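-- pv_equiv track=rewrite | github.com/RuofanChen03/CSCA08 | a2/voting_systems.py | voting_approval
-- ===== SOURCE A (Python) =====
-- from typing import List
--
-- def voting_approval(approval_ballots: List[List[bool]],
--                     party_order: List[str]) -> List[int]:
--     """Return the total number of approvals for each party in approval
--     ballots approval_ballots, in the order specified in party_order.
--
--     Pre: len of each sublist of approval_ballots is len(party_order)
--          the approvals in each ballot are specified in the order of party_order
--
--     >>> voting_approval([[True, True, False, False],
--     ...                  [False, False, False, True],
--     ...                  [False, True, False, False]], SAMPLE_ORDER_1)
--     [1, 2, 0, 1]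
--     >>> voting_approval([[True, False, True, False], [True, True, True, True],
--     ...                  [False, True, True, True]], SAMPLE_ORDER_1)
--     [2, 2, 3, 2]
--     >>> voting_approval([], SAMPLE_ORDER_1)
--     [0, 0, 0, 0]
--     """
--
--     # Initializing the summary of votes to be 0 for each party.
--     vote_summary = []
--     for i in party_order:
--         vote_summary.append(0)
--     # The sum of votes of the parties is then modified & returned.
--     for vote in approval_ballots:
--         for i in range(len(party_order)):
--             if vote[i]:
--                 vote_summary[i] += 1
--     return vote_summary
-- ===== SOURCE B (Python) =====
-- from typing import List
--
-- def voting_approval(approval_ballots: List[List[bool]],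
--                     party_order: List[str]) -> List[int]:
--     """Divide-and-conquer: reduce the ballots by recursive halving,
--     combining partial tallies with elementwise vector addition."""
--     n = len(party_order)
--
--     def vec_sum(lo: int, hi: int) -> List[int]:
--         if hi - lo == 0:
--             return [0] * n
--         if hi - lo == 1:
--             return [int(v) for v in approval_ballots[lo][:n]]
--         mid = (lo + hi) // 2
--         return [x + y for x, y in zip(vec_sum(lo, mid), vec_sum(mid, hi))]
--
--     return vec_sum(0, len(approval_ballots))
-- ===== Notes on version B (the rewrite author's own statement) =====
-- stated objective: alternative
-- what changed: Replace A's mutable per-ballot accumulator with a divide-and-conquer reduction: each ballot becomes a 0/1 vector and halves are combined by elementwise zip addition, with no index arithmetic or in-place updates.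
-- outside the precondition, e.g. on voting_approval([[True]], ['a', 'b']): A raises IndexError, B returns [1]
import Mathlib
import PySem

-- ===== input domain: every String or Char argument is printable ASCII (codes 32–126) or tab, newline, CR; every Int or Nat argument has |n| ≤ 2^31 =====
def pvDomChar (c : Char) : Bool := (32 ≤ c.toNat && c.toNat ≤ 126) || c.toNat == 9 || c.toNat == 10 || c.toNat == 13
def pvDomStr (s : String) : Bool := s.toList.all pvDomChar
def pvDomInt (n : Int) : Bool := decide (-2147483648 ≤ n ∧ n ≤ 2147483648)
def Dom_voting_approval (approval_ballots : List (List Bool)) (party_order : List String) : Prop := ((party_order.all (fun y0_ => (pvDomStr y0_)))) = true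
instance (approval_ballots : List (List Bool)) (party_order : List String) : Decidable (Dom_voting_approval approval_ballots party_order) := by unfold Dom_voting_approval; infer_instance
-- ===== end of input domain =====

-- B replaces A's mutable per-ballot accumulator with a divide-and-conquer
-- reduction: ballots become 0/1 vectors combined by elementwise zip addition.

-- ===== PORT A =====
def voting_approval (approval_ballots : List (List Bool)) (party_order : List String) : List Int :=
  -- vote_summary = []; for i in party_order: vote_summary.append(0)
  let vote_summary : List Int := party_order.foldl (fun acc _ => acc ++ [(0 : Int)]) []
  -- for vote in approval_ballots: for i in range(len(party_order)): if vote[i]: vote_summary[i] += 1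
  approval_ballots.foldl (fun vs vote =>
    (PySem.List.pyRange 0 (party_order.length : Int) 1).foldl (fun vs i =>
      if PySem.List.pyGetD vote i false then
        vs.set i.toNat (PySem.List.pyGetD vs i 0 + 1)
      else vs) vs) vote_summary

-- ===== PORT B =====
-- def vec_sum(lo, hi): recursion on hi - lo; lo, hi are always 0 ≤ lo ≤ hi here,
-- so Nat indices, Nat division ((lo+hi)//2) and List.take (ballot[:n]) are exact.
def pvVecSum (ab : List (List Bool)) (n : Nat) (lo hi : Nat) : List Int :=
  if hi - lo = 0 then List.replicate n 0                          -- [0] * n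
  else if hi - lo = 1 then
    ((ab.getD lo []).take n).map (fun v => if v then (1 : Int) else 0)   -- [int(v) for v in approval_ballots[lo][:n]]
  else
    -- mid = (lo + hi) // 2; [x + y for x, y in zip(vec_sum(lo, mid), vec_sum(mid, hi))]
    List.zipWith (· + ·) (pvVecSum ab n lo ((lo + hi) / 2)) (pvVecSum ab n ((lo + hi) / 2) hi)
termination_by hi - lo
decreasing_by all_goals omega

def voting_approval_alt (approval_ballots : List (List Bool)) (party_order : List String) : List Int :=
  pvVecSum approval_ballots party_order.length 0 approval_ballots.length

-- ===== PRECONDITION & SPEC =====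
-- Pre_ excludes inputs on which Python A raises IndexError: a ballot shorter than party_order.
def Pre_voting_approval (approval_ballots : List (List Bool)) (party_order : List String) : Prop :=
  ∀ b ∈ approval_ballots, party_order.length ≤ b.length
instance (approval_ballots : List (List Bool)) (party_order : List String) : Decidable (Pre_voting_approval approval_ballots party_order) := by unfold Pre_voting_approval; infer_instance

def pvWitness_voting_approval : List (List Bool) × List String :=
  ([[true, false], [false, true], [true, true]], ["a", "b"])

def Spec_voting_approval (approval_ballots : List (List Bool)) (party_order : List String) (out : List Int) : Prop := out = voting_approval_alt approval_ballots party_order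
instance (approval_ballots : List (List Bool)) (party_order : List String) (out : List Int) : Decidable (Spec_voting_approval approval_ballots party_order out) := by unfold Spec_voting_approval; infer_instance

-- ===== CLAIM (what is proved, stated in full; the proofs are below) =====
def Claim_equal_voting_approval : Prop := ∀ (approval_ballots : List (List Bool)) (party_order : List String), Dom_voting_approval approval_ballots party_order → Pre_voting_approval approval_ballots party_order → Spec_voting_approval approval_ballots party_order (voting_approval approval_ballots party_order)

-- ===== LEMMAS AND PROOFS =====

-- A's initialisation loop builds a list of zeros.
theorem pv_init_eq (po : List String) (acc : List Int) :
    po.foldl (fun a _ => a ++ [(0 : Int)]) acc = acc ++ List.replicate po.length 0 := by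
  induction po generalizing acc with
  | nil => simp
  | cons p po ih =>
      simp [List.foldl_cons, ih, List.replicate_succ]

-- shifting the indices of A's inner loop past a cons cell
theorem pv_shift (l : List Nat) (c : Nat → Bool) (y : Int) (t : List Int) :
    (l.map (fun k => k + 1)).foldl
        (fun a k => if c k then a.set k (a.getD k 0 + 1) else a) (y :: t)
      = y :: l.foldl (fun a k => if c (k + 1) then a.set k (a.getD k 0 + 1) else a) t := by
  induction l generalizing y t with
  | nil => simp
  | cons k l ih =>
      rw [List.map_cons, List.foldl_cons]
      by_cases h : c (k + 1)
      · rw [if_pos h]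
        have hset : (y :: t).set (k + 1) ((y :: t).getD (k + 1) 0 + 1)
            = y :: t.set k (t.getD k 0 + 1) := by
          simp [List.getD]
        rw [hset, ih, List.foldl_cons, if_pos h]
      · rw [if_neg h, ih, List.foldl_cons, if_neg h]

-- A's inner loop over range(len) is a pointwise bump of the accumulator.
theorem pv_inner (t : List Int) (c : Nat → Bool) :
    (List.range t.length).foldl
        (fun a k => if c k then a.set k (a.getD k 0 + 1) else a) t
      = t.mapIdx (fun k x => x + if c k then 1 else 0) := by
  induction t generalizing c with
  | nil => simp
  | cons x t ih =>
      rw [List.length_cons, List.range_succ_eq_map, List.foldl_cons]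
      have h0 : (if c 0 then (x :: t).set 0 ((x :: t).getD 0 0 + 1) else x :: t)
          = (x + if c 0 then 1 else 0) :: t := by
        by_cases h : c 0 <;> simp [h]
      rw [h0, pv_shift, ih (fun k => c (k + 1)), List.mapIdx_cons]

-- fold of a sum with a nonzero start
theorem pv_fold_add (w : List Bool → Int) (ab : List (List Bool)) (a : Int) :
    ab.foldl (fun s v => s + w v) a = a + ab.foldl (fun s v => s + w v) 0 := by
  induction ab generalizing a with
  | nil => simp
  | cons v ab ih =>
      rw [List.foldl_cons, List.foldl_cons, ih (a + w v), ih (0 + w v)]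
      ring

-- A's outer fold of pointwise bumps is a pointwise sum over the ballots.
theorem pv_outer (w : List Bool → Nat → Int) (ab : List (List Bool)) (vs : List Int) :
    ab.foldl (fun vs vote => vs.mapIdx (fun k x => x + w vote k)) vs
      = vs.mapIdx (fun k x => x + ab.foldl (fun s vote => s + w vote k) 0) := by
  induction ab generalizing vs with
  | nil =>
      apply List.ext_getElem <;> simp
  | cons v ab ih =>
      rw [List.foldl_cons, ih]
      apply List.ext_getElem
      · simp
      · intro k h1 h2
        simp only [List.getElem_mapIdx, List.foldl_cons]
        rw [pv_fold_add (fun vote => w vote k) ab (0 + w v k)]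
        ring

-- the per-column approval count both programs compute
def pvCol (ab : List (List Bool)) (k : Nat) : Int :=
  ab.foldl (fun s b => s + if b.getD k false then (1 : Int) else 0) 0

theorem pv_col_append (xs ys : List (List Bool)) (k : Nat) :
    pvCol (xs ++ ys) k = pvCol xs k + pvCol ys k := by
  unfold pvCol
  rw [List.foldl_append, pv_fold_add (fun b => if b.getD k false then (1 : Int) else 0)]

-- zip-adding two maps over the same range is a map of the pointwise sum
theorem pv_zip_map (l : List Nat) (f g : Nat → Int) :
    List.zipWith (· + ·) (l.map f) (l.map g) = l.map (fun k => f k + g k) := by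
  induction l with
  | nil => rfl
  | cons x l ih => simp [ih]

-- A's fold, with indices cast away, step by step preserving the length invariant
theorem pv_astep (n : Nat) (ab : List (List Bool)) (vs : List Int) (h : vs.length = n) :
    ab.foldl (fun vs vote =>
        (PySem.List.pyRange 0 (n : Int) 1).foldl (fun vs i =>
          if PySem.List.pyGetD vote i false then
            vs.set i.toNat (PySem.List.pyGetD vs i 0 + 1)
          else vs) vs) vs
      = ab.foldl (fun vs vote =>
          vs.mapIdx (fun k x => x + if vote.getD k false then (1 : Int) else 0)) vs := by
  induction ab generalizing vs with
  | nil => rfl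
  | cons v ab ih =>
      rw [List.foldl_cons, List.foldl_cons]
      have hr : (PySem.List.pyRange 0 (n : Int) 1).foldl (fun vs i =>
            if PySem.List.pyGetD v i false then
              vs.set i.toNat (PySem.List.pyGetD vs i 0 + 1)
            else vs) vs
          = vs.mapIdx (fun k x => x + if v.getD k false then (1 : Int) else 0) := by
        rw [PySem.List.pyRange_zero_nat, List.foldl_map]
        simp only [PySem.List.pyGetD_natCast, Int.toNat_natCast]
        rw [← h, pv_inner vs (fun k => v.getD k false)]
      rw [hr, ih]
      simp [h]

-- B's divide-and-conquer recursion computes the column sums of its ballot segment.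
theorem pv_vecSum_eq (ab : List (List Bool)) (n : Nat)
    (hpre : ∀ b ∈ ab, n ≤ b.length) :
    ∀ d lo hi, hi - lo = d → hi ≤ ab.length →
      pvVecSum ab n lo hi
        = (List.range n).map (fun k => pvCol ((ab.drop lo).take (hi - lo)) k) := by
  intro d
  induction d using Nat.strong_induction_on with
  | _ d ih =>
    intro lo hi hd hhi
    match d, hd with
    | 0, hd =>
        rw [pvVecSum, if_pos hd, hd]
        simp [pvCol, List.map_const']
    | 1, hd =>
        have hlo : lo < ab.length := by omega
        rw [pvVecSum, if_neg (by omega), if_pos hd, hd]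
        have hget : ab.getD lo [] = ab[lo] := List.getD_eq_getElem ab [] hlo
        rw [hget]
        have hseg : (ab.drop lo).take 1 = [ab[lo]] := by
          rw [List.drop_eq_getElem_cons hlo]
          rfl
        rw [hseg]
        have hb : n ≤ (ab[lo]).length := hpre _ (List.getElem_mem hlo)
        apply List.ext_getElem
        · simp; omega
        · intro k h1 h2
          have hk : k < n := by simpa using h2
          have hkb : k < (ab[lo]).length := Nat.lt_of_lt_of_le hk hb
          simp [pvCol, List.getD, hkb]
    | (e + 2), hd =>
        have h2 : 2 ≤ hi - lo := by omega
        rw [pvVecSum, if_neg (by omega), if_neg (by omega)]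
        have hmid1 : lo < (lo + hi) / 2 := by omega
        have hmid2 : (lo + hi) / 2 < hi := by omega
        rw [ih ((lo + hi) / 2 - lo) (by omega) lo ((lo + hi) / 2) rfl (by omega),
            ih (hi - (lo + hi) / 2) (by omega) ((lo + hi) / 2) hi rfl hhi,
            pv_zip_map]
        have hsplit : (ab.drop lo).take (hi - lo)
            = (ab.drop lo).take ((lo + hi) / 2 - lo)
              ++ (ab.drop ((lo + hi) / 2)).take (hi - (lo + hi) / 2) := by
          have hdd : ab.drop ((lo + hi) / 2)
              = (ab.drop lo).drop ((lo + hi) / 2 - lo) := by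
            rw [List.drop_drop]; congr 1; omega
          rw [hdd, ← List.take_add]
          congr 1; omega
        rw [hsplit]
        apply List.map_congr_left
        intro k _
        exact (pv_col_append _ _ k).symm

-- A's pointwise-bumped zero vector, written as a map over range
theorem pv_mapIdx_replicate (n : Nat) (f : Nat → Int) :
    (List.replicate n (0 : Int)).mapIdx (fun k x => x + f k) = (List.range n).map f := by
  apply List.ext_getElem
  · simp
  · intro k h1 h2
    simp [List.getElem_mapIdx]

-- ===== VERDICT (by name: the statement is the Claim_ definition above) =====
theorem voting_approval_spec : Claim_equal_voting_approval := by
  intro ab po _hdom hpre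
  unfold Spec_voting_approval voting_approval voting_approval_alt
  rw [pv_init_eq po [], List.nil_append]
  rw [pv_astep po.length ab (List.replicate po.length 0) (by simp)]
  rw [pv_outer (fun vote k => if vote.getD k false then (1 : Int) else 0) ab]
  rw [pv_mapIdx_replicate]
  rw [pv_vecSum_eq ab po.length hpre ab.length 0 ab.length (by omega) (le_refl _)]
  simp [pvCol]
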